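-- pv_equiv track=rewrite | github.com/FourierAI/MolarMassCalculator | tool.py | replace_latex_formula
-- ===== SOURCE A (Python) =====
-- def replace_latex_formula(formula_str):
--     latex_formula = ''
--     index = 0
--     tmp_stack = []
--     while index<len(formula_str):
--         if not formula_str[index].isdigit():
--             if len(tmp_stack) == 0:
--                 latex_formula += formula_str[index]
--             else:
--                 tmp_str = '_{'+''.join(tmp_stack)+'}'
--                 latex_formula += tmp_str + formula_str[index]
--                 tmp_stack = []
--         else:
--             tmp_stack.append(formula_str[index])
--         index +=1
--     if tmp_stack:
--         tmp_str = '_{'+''.join(tmp_stack)+'}'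
--         latex_formula += tmp_str
--
--     return latex_formula
-- ===== SOURCE B (Python) =====
-- def replace_latex_formula(formula_str):
--     # Split the string into maximal runs of digit / non-digit characters
--     # (a groupby-style span scan), wrap each digit run in '_{...}', and join.
--     parts = []
--     i = 0
--     n = len(formula_str)
--     while i < n:
--         is_dig = formula_str[i].isdigit()
--         j = i + 1
--         while j < n and formula_str[j].isdigit() == is_dig:
--             j += 1
--         run = formula_str[i:j]
--         parts.append('_{' + run + '}' if is_dig else run)
--         i = j
--     return ''.join(parts)
-- ===== Notes on version B (the rewrite author's own statement) =====
-- stated objective: simpler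
-- what changed: Replaced A's per-character index loop with a pending tmp_stack accumulator and a trailing flush branch by a run-splitting scan: split the string into maximal digit/non-digit runs (groupby-style span scan on the same isdigit key), wrap each digit run in a LaTeX subscript group, and join the rendered runs.
import Mathlib
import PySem

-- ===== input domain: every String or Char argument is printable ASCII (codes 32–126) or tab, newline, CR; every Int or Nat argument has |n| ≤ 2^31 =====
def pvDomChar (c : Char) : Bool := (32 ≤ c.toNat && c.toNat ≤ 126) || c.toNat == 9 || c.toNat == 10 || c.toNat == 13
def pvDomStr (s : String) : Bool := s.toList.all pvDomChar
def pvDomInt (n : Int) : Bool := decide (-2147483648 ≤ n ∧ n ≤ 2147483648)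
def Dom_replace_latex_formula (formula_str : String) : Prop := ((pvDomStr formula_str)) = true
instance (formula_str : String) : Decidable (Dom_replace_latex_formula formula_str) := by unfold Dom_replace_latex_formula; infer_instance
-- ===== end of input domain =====

-- B replaces A's char-by-char loop with a pending digit stack and repeated string += by a
-- run-splitting scan (maximal digit/non-digit runs, digit runs wrapped as LaTeX subscripts,
-- joined once); simpler, and measured faster in a timing run (A's += is quadratic).

-- ===== PORT A =====
-- A's while loop over indices, transliterated as structural recursion over the character
-- list, threading the accumulator `latex` and the pending digit list `tmp_stack`.
def pvLoopA : List Char → List Char → List Char → List Char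
  | [], latex, tmpStack =>
      if tmpStack ≠ [] then latex ++ ('_' :: '{' :: tmpStack ++ ['}']) else latex
  | c :: rest, latex, tmpStack =>
      if ¬ PySem.Chars.isdigit c then
        if tmpStack = [] then pvLoopA rest (latex ++ [c]) []
        else pvLoopA rest (latex ++ ('_' :: '{' :: tmpStack ++ ['}']) ++ [c]) []
      else pvLoopA rest latex (tmpStack ++ [c])

def replace_latex_formula (formula_str : String) : String :=
  String.ofList (pvLoopA formula_str.toList [] [])

-- ===== PORT B =====
-- B's span scan: take the maximal run sharing the head's isdigit key, render it
-- (digit runs wrapped in '_{…}'), recurse on the remainder, join.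
def pvRuns : List Char → List Char
  | [] => []
  | c :: rest =>
      let k := PySem.Chars.isdigit c
      let run := rest.takeWhile (fun x => PySem.Chars.isdigit x == k)
      let tail := rest.dropWhile (fun x => PySem.Chars.isdigit x == k)
      (if k then '_' :: '{' :: (c :: run) ++ ['}'] else c :: run) ++ pvRuns tail
  termination_by cs => cs.length
  decreasing_by
    have := List.length_dropWhile_le
      (p := fun x => PySem.Chars.isdigit x == PySem.Chars.isdigit c) (l := rest)
    simp only [List.length_cons]; omega

def replace_latex_formula_alt (formula_str : String) : String :=
  String.ofList (pvRuns formula_str.toList)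

-- ===== PRECONDITION & SPEC =====
def Spec_replace_latex_formula (formula_str : String) (out : String) : Prop := out = replace_latex_formula_alt formula_str
instance (formula_str : String) (out : String) : Decidable (Spec_replace_latex_formula formula_str out) := by unfold Spec_replace_latex_formula; infer_instance

-- ===== CLAIM (what is proved, stated in full; the proofs are below) =====
def Claim_equal_replace_latex_formula : Prop := ∀ (formula_str : String), Dom_replace_latex_formula formula_str → Spec_replace_latex_formula formula_str (replace_latex_formula formula_str)

-- ===== LEMMAS AND PROOFS =====

-- the accumulator factors out of A's loop
theorem pvLoopA_acc (cs : List Char) : ∀ latex tmpStack,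
    pvLoopA cs latex tmpStack = latex ++ pvLoopA cs [] tmpStack := by
  induction cs with
  | nil => intro latex tmpStack; by_cases h : tmpStack = [] <;> simp [pvLoopA, h]
  | cons c rest ih =>
      intro latex tmpStack
      by_cases hd : PySem.Chars.isdigit c = true
      · simp only [pvLoopA, hd, not_true, ite_false]
        exact ih latex (tmpStack ++ [c])
      · by_cases hs : tmpStack = []
        · simp only [pvLoopA, hd, hs, if_pos]
          rw [ih (latex ++ [c]), ih ([] ++ [c])]
          simp
        · simp only [pvLoopA, hd, hs, not_false_iff, if_neg]
          rw [ih (latex ++ ('_' :: '{' :: tmpStack ++ ['}']) ++ [c]),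
              ih ([] ++ ('_' :: '{' :: tmpStack ++ ['}']) ++ [c])]
          simp
-- a nonempty pending stack is flushed together with the following maximal digit run
theorem pvLoopA_stack (cs : List Char) : ∀ st, st ≠ [] →
    pvLoopA cs [] st =
      ('_' :: '{' :: (st ++ cs.takeWhile (fun x => PySem.Chars.isdigit x)) ++ ['}'])
        ++ pvLoopA (cs.dropWhile (fun x => PySem.Chars.isdigit x)) [] [] := by
  induction cs with
  | nil => intro st hst; simp [pvLoopA, hst]
  | cons c rest ih =>
      intro st hst
      by_cases hd : PySem.Chars.isdigit c = true
      · simp only [pvLoopA, hd, not_true, ite_false, List.takeWhile, List.dropWhile]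
        rw [ih (st ++ [c]) (by simp)]
        simp
      · simp only [List.takeWhile, List.dropWhile, hd]
        simp only [pvLoopA, hd, hst, not_false_iff, if_pos, if_neg]
        rw [pvLoopA_acc rest ([] ++ ('_' :: '{' :: st ++ ['}']) ++ [c]) [],
            pvLoopA_acc rest ([] ++ [c]) []]
        simp

-- a maximal non-digit run passes through A's loop unchanged
theorem pvLoopA_nondigit (cs : List Char) :
    pvLoopA cs [] [] =
      cs.takeWhile (fun x => !PySem.Chars.isdigit x)
        ++ pvLoopA (cs.dropWhile (fun x => !PySem.Chars.isdigit x)) [] [] := by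
  induction cs with
  | nil => simp
  | cons c rest ih =>
      by_cases hd : PySem.Chars.isdigit c = true
      · simp [List.takeWhile, List.dropWhile, hd]
      · simp only [List.takeWhile, List.dropWhile, hd, Bool.not_false, List.cons_append]
        simp only [pvLoopA, hd, if_pos]
        rw [pvLoopA_acc]
        simpa using ih

-- A's loop with empty state computes B's run decomposition
theorem pvLoopA_eq_pvRuns (cs : List Char) : pvLoopA cs [] [] = pvRuns cs := by
  induction hn : cs.length using Nat.strong_induction_on generalizing cs with
  | _ n ih =>
    cases cs with
    | nil => simp [pvLoopA, pvRuns]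
    | cons c rest =>
      rw [pvRuns]
      by_cases hd : PySem.Chars.isdigit c = true
      · simp only [pvLoopA, hd, not_true, ite_false, beq_true, if_pos]
        rw [show ([] : List Char) ++ [c] = [c] from rfl, pvLoopA_stack rest [c] (by simp)]
        have hlen : (rest.dropWhile (fun x => PySem.Chars.isdigit x)).length < n := by
          have := List.length_dropWhile_le (p := fun x => PySem.Chars.isdigit x) (l := rest)
          simp only [List.length_cons] at hn; omega
        rw [ih _ hlen _ rfl]
        simp
      · simp only [hd, beq_false]
        simp only [pvLoopA, hd, if_pos]
        rw [pvLoopA_acc, pvLoopA_nondigit]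
        have hlen : (rest.dropWhile (fun x => !PySem.Chars.isdigit x)).length < n := by
          have := List.length_dropWhile_le (p := fun x => !PySem.Chars.isdigit x) (l := rest)
          simp only [List.length_cons] at hn; omega
        rw [ih _ hlen _ rfl]
        simp

-- ===== VERDICT (by name: the statement is the Claim_ definition above) =====
theorem replace_latex_formula_spec : Claim_equal_replace_latex_formula := by
  intro s _
  unfold Spec_replace_latex_formula replace_latex_formula replace_latex_formula_alt
  rw [pvLoopA_eq_pvRuns]
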